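-- pv_equiv track=rewrite | github.com/catalinariquelme/USACH | FCYP/Funciones/Censura.py | censurar_pabras
-- ===== SOURCE A (Python) =====
-- def censurar_pabras(palabraPorCensurar,texto):
--     i = 0
--     posicionesPalabras = []
--
--     #Se edentifica en que indices se encuentran las palabras, se guardan en una lista
--     while i < len(texto):
--         if texto[i] == palabraPorCensurar:
--             posicionesPalabras.append(i)
--         i += 1
--
--     i = 0
--
--     #Con la lista de los indices se identifica en que parte se encuentran las palabras
--     #Una vez identificada la palabra se analiza solo ese indice
--     while i < len(posicionesPalabras):
--         palabra = texto[posicionesPalabras[i]]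
--         j = 0
--         listaPalabra = []
--
--         #Se convierte cada letra de la palabra en un objeto de una lista con el finde modificarse
--         while j < len(palabra):
--             listaPalabra.append(palabra[j])
--             j +=1
--         j = 1
--         #Se modifica cada una de las letras por un *, excepto la primera
--         while j < len(listaPalabra):
--             listaPalabra[j]="*"
--             j+=1
--         censura = "".join(listaPalabra)
--         texto[posicionesPalabras[i]] = censura
--         i +=1
--
--     string = " ".join(texto)
--     return string
-- ===== SOURCE B (Python) =====
-- def censurar_pabras(palabraPorCensurar, texto):
--     # single pass: replace each matching word by first char + '*' padding, in place
--     for i, palabra in enumerate(texto):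
--         if palabra == palabraPorCensurar:
--             texto[i] = palabra[:1] + "*" * (len(palabra) - 1)
--     return " ".join(texto)
-- ===== Notes on version B (the rewrite author's own statement) =====
-- stated objective: simpler
-- what changed: Replaces A's two-phase scan (collect match positions, then rebuild each matched word as a char list and star its tail in a loop) with one direct pass that assigns palabra[:1] + '*'*(len(palabra)-1) to each matching slot.
import Mathlib
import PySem

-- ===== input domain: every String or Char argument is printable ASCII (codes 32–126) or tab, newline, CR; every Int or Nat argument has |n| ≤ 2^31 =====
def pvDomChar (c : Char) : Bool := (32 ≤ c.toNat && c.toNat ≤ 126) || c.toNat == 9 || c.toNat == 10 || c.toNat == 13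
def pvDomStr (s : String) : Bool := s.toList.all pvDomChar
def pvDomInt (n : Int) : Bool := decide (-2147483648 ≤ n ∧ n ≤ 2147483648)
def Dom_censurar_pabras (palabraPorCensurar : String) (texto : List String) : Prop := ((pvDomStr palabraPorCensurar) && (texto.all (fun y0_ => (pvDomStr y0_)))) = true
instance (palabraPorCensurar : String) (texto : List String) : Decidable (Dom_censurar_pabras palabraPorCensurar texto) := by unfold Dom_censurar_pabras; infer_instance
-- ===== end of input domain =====

-- ===== PORT A =====
-- B computes the censored word directly (palabra[:1] + '*'*(len-1)) in one pass instead of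
-- A's two phases; both Pythons mutate texto in place identically, the proof is about the return value.
-- helper: the per-word censoring A performs (char-list rebuild, then star all but index 0)
def pvCensorA (palabra : String) : String :=
  let listaPalabra : List Char :=
    (PySem.List.pyRange 0 (palabra.toList.length : Int) 1).foldl
      (fun acc j => acc ++ [PySem.List.pyGetD palabra.toList j ' ']) []
  let lista2 : List Char :=
    (PySem.List.pyRange 1 (listaPalabra.length : Int) 1).foldl
      (fun acc j => acc.set j.toNat '*') listaPalabra
  String.ofList lista2

def censurar_pabras (palabraPorCensurar : String) (texto : List String) : String :=
  -- first while loop: collect the indices whose word equals palabraPorCensurar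
  let posicionesPalabras : List Int :=
    (PySem.List.pyRange 0 (texto.length : Int) 1).foldl
      (fun acc i => if PySem.List.pyGetD texto i "" == palabraPorCensurar then acc ++ [i] else acc) []
  -- second while loop: for each stored index, rebuild the word there and overwrite that slot
  let texto2 : List String :=
    posicionesPalabras.foldl
      (fun cur pos => cur.set pos.toNat (pvCensorA (PySem.List.pyGetD cur pos ""))) texto
  PySem.Str.join " " texto2

-- ===== PORT B =====
def censurar_pabras_alt (palabraPorCensurar : String) (texto : List String) : String :=
  PySem.Str.join " "
    (texto.map (fun palabra =>
      if palabra == palabraPorCensurar then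
        String.ofList (palabra.toList.take 1 ++ List.replicate (palabra.toList.length - 1) '*')
      else palabra))

-- ===== PRECONDITION & SPEC =====
def Spec_censurar_pabras (palabraPorCensurar : String) (texto : List String) (out : String) : Prop := out = censurar_pabras_alt palabraPorCensurar texto
instance (palabraPorCensurar : String) (texto : List String) (out : String) : Decidable (Spec_censurar_pabras palabraPorCensurar texto out) := by unfold Spec_censurar_pabras; infer_instance

-- ===== CLAIM (what is proved, stated in full; the proofs are below) =====
def Claim_equal_censurar_pabras : Prop := ∀ (palabraPorCensurar : String) (texto : List String), Dom_censurar_pabras palabraPorCensurar texto → Spec_censurar_pabras palabraPorCensurar texto (censurar_pabras palabraPorCensurar texto)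

-- ===== LEMMAS AND PROOFS =====

-- the starring loop: setting '*' at every index from k up equals take k ++ replicate stars
theorem pv_star_fold (l : List Char) (k : Nat) :
    (PySem.List.pyRange (k : Int) (l.length : Int) 1).foldl
      (fun acc j => acc.set j.toNat '*') l
    = l.take k ++ List.replicate (l.length - k) '*' := by
  by_cases h : l.length ≤ k
  · rw [PySem.List.pyRange_one_eq_nil (by exact_mod_cast h)]
    simp [List.take_of_length_le h, Nat.sub_eq_zero_of_le h]
  · rw [not_le] at h
    have hk : (k : Int) < (l.length : Int) := by exact_mod_cast h
    rw [PySem.List.pyRange_one_cons hk]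
    simp only [List.foldl_cons, Int.toNat_natCast]
    have ih := pv_star_fold (l.set k '*') (k + 1)
    simp only [List.length_set] at ih
    have hcast : ((k : Int) + 1) = ((k + 1 : Nat) : Int) := by push_cast; ring
    rw [hcast, ih, List.take_add_one, List.getElem?_set_self (by omega), List.take_set,
        List.set_eq_of_length_le (by simp)]
    have hrep : l.length - k = (l.length - (k + 1)) + 1 := by omega
    rw [hrep, List.replicate_succ]
    simp
termination_by l.length - k

-- A's inner two while loops compute exactly B's censored word
theorem pv_censorA_eq (w : String) :
    pvCensorA w
    = String.ofList (w.toList.take 1 ++ List.replicate (w.toList.length - 1) '*') := by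
  unfold pvCensorA
  rw [PySem.List.foldl_pyRange_zero_pyGetD' w.toList ' ' (fun acc c => acc ++ [c]) []]
  rw [PySem.List.foldl_append_singleton_eq_self]
  simp only [List.nil_append]
  have hs := pv_star_fold w.toList 1
  simp only [Nat.cast_one] at hs
  rw [hs]

-- the overwrite fold: length is preserved
theorem pv_fold_set_length (f : String → String) (ps : List Int) (texto : List String) :
    (ps.foldl (fun cur pos => cur.set pos.toNat (f (PySem.List.pyGetD cur pos ""))) texto).length
    = texto.length := by
  induction ps generalizing texto with
  | nil => rfl
  | cons pos rest ih => simp [List.foldl_cons, ih]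

-- the overwrite fold, elementwise: slot k gets f applied iff k is among the positions
theorem pv_fold_set_getElem (f : String → String) (ps : List Int) (texto : List String)
    (hmem : ∀ i ∈ ps, 0 ≤ i ∧ i < (texto.length : Int)) (hnd : ps.Nodup)
    (k : Nat) (hk : k < texto.length)
    (hk' : k < (ps.foldl (fun cur pos => cur.set pos.toNat (f (PySem.List.pyGetD cur pos ""))) texto).length) :
    (ps.foldl (fun cur pos => cur.set pos.toNat (f (PySem.List.pyGetD cur pos ""))) texto)[k]
    = if (k : Int) ∈ ps then f texto[k] else texto[k] := by
  induction ps generalizing texto with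
  | nil => simp
  | cons pos rest ih =>
    simp only [List.foldl_cons]
    have hpos := hmem pos (by simp)
    have hposlt : pos.toNat < texto.length := by omega
    have hget : PySem.List.pyGetD texto pos "" = texto[pos.toNat] :=
      @PySem.List.pyGetD_eq_getElem _ texto pos "" hpos.1 (by simpa using hpos.2)
    have hlen : (texto.set pos.toNat (f (PySem.List.pyGetD texto pos ""))).length = texto.length := by simp
    have hrec := ih (texto.set pos.toNat (f (PySem.List.pyGetD texto pos "")))
      (by intro i hi; have := hmem i (by simp [hi]); simpa [hlen] using this)
      (List.Nodup.of_cons hnd) (by omega)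
      (by simpa [pv_fold_set_length] using hk)
    rw [hrec]
    by_cases hkp : (k : Int) = pos
    · have hkp' : k = pos.toNat := by omega
      have hknr : (k : Int) ∉ rest := by
        rw [hkp]; exact (List.nodup_cons.mp hnd).1
      rw [if_neg hknr, if_pos (by simp [hkp])]
      simp [hkp', hget, List.getElem_set_self]
    · have hne : pos.toNat ≠ k := by omega
      rw [List.getElem_set_ne hne]
      by_cases hkr : (k : Int) ∈ rest <;> simp [hkr, hkp]

-- A's position-collecting loop is a filter of the index range
theorem pv_positions_eq (p : String) (texto : List String) :
    (PySem.List.pyRange 0 (texto.length : Int) 1).foldl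
      (fun acc i => if PySem.List.pyGetD texto i "" == p then acc ++ [i] else acc) []
    = (PySem.List.pyRange 0 (texto.length : Int) 1).filter
        (fun i => PySem.List.pyGetD texto i "" == p) := by
  rw [PySem.List.foldl_append_if_eq_filter]
  simp

-- the combined list-level fact: A's texto2 equals B's map
theorem pv_texto2_eq (p : String) (texto : List String) :
    ((PySem.List.pyRange 0 (texto.length : Int) 1).filter
        (fun i => PySem.List.pyGetD texto i "" == p)).foldl
      (fun cur pos => cur.set pos.toNat (pvCensorA (PySem.List.pyGetD cur pos ""))) texto
    = texto.map (fun w =>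
        if w == p then
          String.ofList (w.toList.take 1 ++ List.replicate (w.toList.length - 1) '*')
        else w) := by
  set ps := (PySem.List.pyRange 0 (texto.length : Int) 1).filter
      (fun i => PySem.List.pyGetD texto i "" == p) with hps
  have hmem : ∀ i ∈ ps, 0 ≤ i ∧ i < (texto.length : Int) := by
    intro i hi
    have := List.mem_of_mem_filter hi
    exact (PySem.List.mem_pyRange_one).mp this
  have hnd : ps.Nodup := List.Nodup.filter _ (PySem.List.nodup_pyRange_one 0 _)
  apply List.ext_getElem
  · rw [pv_fold_set_length]; simp
  · intro k hk1 hk2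
    have hk : k < texto.length := by rw [pv_fold_set_length] at hk1; exact hk1
    rw [pv_fold_set_getElem (fun w => pvCensorA w) ps texto hmem hnd k hk hk1]
    have hmemps : ((k : Int) ∈ ps) ↔ (texto[k] == p) = true := by
      rw [hps, List.mem_filter]
      have hgk : PySem.List.pyGetD texto (k : Int) "" = texto[k] := by
        rw [@PySem.List.pyGetD_eq_getElem _ texto (k : Int) "" (by omega) (by exact_mod_cast hk)]
        simp
      constructor
      · intro ⟨_, h2⟩
        rwa [hgk] at h2
      · intro h2
        refine ⟨(PySem.List.mem_pyRange_one).mpr ⟨by omega, by exact_mod_cast hk⟩, ?_⟩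
        rwa [hgk]
    rw [List.getElem_map]
    by_cases hc : (texto[k] == p) = true
    · rw [if_pos (hmemps.mpr hc), if_pos hc, pv_censorA_eq]
    · rw [if_neg (fun h => hc (hmemps.mp h)), if_neg hc]

-- ===== VERDICT (by name: the statement is the Claim_ definition above) =====
theorem censurar_pabras_spec : Claim_equal_censurar_pabras := by
  intro p texto _
  unfold Spec_censurar_pabras censurar_pabras censurar_pabras_alt
  simp only
  rw [pv_positions_eq, pv_texto2_eq]
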